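-- pv_equiv track=rewrite | github.com/yosoyeltato2020/CodigosPython | utilidades.py | determinar_ganador
-- ===== SOURCE A (Python) =====
-- reglas = [
--     {"opcion": 1, "nombre": "Piedra", "vence_a": [3, 4]},
--     {"opcion": 2, "nombre": "Papel", "vence_a": [1, 5]},
--     {"opcion": 3, "nombre": "Tijera", "vence_a": [2, 4]},
--     {"opcion": 4, "nombre": "Lagarto", "vence_a": [2, 5]},
--     {"opcion": 5, "nombre": "Spock", "vence_a": [1, 3]},
-- ]
--
-- def determinar_ganador(usuario1, usuario2):
--     if usuario1 == usuario2:
--         return "empate"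
--
--     for regla in reglas:
--         if regla["opcion"] == usuario1 and usuario2 in regla["vence_a"]:
--             return "usuario1"
--         elif regla["opcion"] == usuario2 and usuario1 in regla["vence_a"]:
--             return "usuario2"
--
--     return "empate"  # Por si acaso
-- ===== SOURCE B (Python) =====
-- # Arithmetic judge: moves are placed on the pentagram cycle Rock,Spock,Paper,Lizard,Scissors;
-- # a move beats another iff the cyclic distance from loser to winner is 1 or 2 (mod 5).
-- _CYCLE = (0, 2, 4, 3, 1)  # cycle position of move k (1=Piedra,2=Papel,3=Tijera,4=Lagarto,5=Spock)
--
-- def determinar_ganador(usuario1, usuario2):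
--     if usuario1 == usuario2 or not (1 <= usuario1 <= 5) or not (1 <= usuario2 <= 5):
--         return "empate"
--     d = (_CYCLE[usuario1 - 1] - _CYCLE[usuario2 - 1]) % 5
--     return "usuario1" if d in (1, 2) else "usuario2"
-- ===== Notes on version B (the rewrite author's own statement) =====
-- stated objective: alternative
-- what changed: Replaces the scan over the rule list by arithmetic: moves are mapped to positions on the pentagram cycle and the winner is decided by (pos1-pos2) mod 5 being 1 or 2, with a range guard returning 'empate' for unknown moves.
import Mathlib
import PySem

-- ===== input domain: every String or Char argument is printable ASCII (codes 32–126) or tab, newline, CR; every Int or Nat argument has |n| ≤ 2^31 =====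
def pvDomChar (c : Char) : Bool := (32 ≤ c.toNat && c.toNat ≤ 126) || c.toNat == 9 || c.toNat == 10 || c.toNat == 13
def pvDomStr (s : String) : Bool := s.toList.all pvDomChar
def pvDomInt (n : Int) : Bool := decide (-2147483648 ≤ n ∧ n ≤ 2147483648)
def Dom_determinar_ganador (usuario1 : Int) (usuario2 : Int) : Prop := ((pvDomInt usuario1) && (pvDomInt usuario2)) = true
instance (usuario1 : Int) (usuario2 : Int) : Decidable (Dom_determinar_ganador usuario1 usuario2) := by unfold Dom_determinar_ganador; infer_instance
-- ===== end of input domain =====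

-- B replaces A's rule-list scan by modular arithmetic on pentagram-cycle positions (objective: alternative).

-- ===== PORT A =====
-- each rule as (opcion, nombre, vence_a); literal transliteration of the module-level `reglas`
def reglas : List (Int × String × List Int) :=
  [ (1, "Piedra",  [3, 4])
  , (2, "Papel",   [1, 5])
  , (3, "Tijera",  [2, 4])
  , (4, "Lagarto", [2, 5])
  , (5, "Spock",   [1, 3]) ]

-- the for-loop of A: first matching rule decides, fall through to "empate"
def determinar_ganador_loop (usuario1 : Int) (usuario2 : Int) : List (Int × String × List Int) → String
  | [] => "empate"
  | regla :: rest =>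
      if regla.1 = usuario1 ∧ usuario2 ∈ regla.2.2 then "usuario1"
      else if regla.1 = usuario2 ∧ usuario1 ∈ regla.2.2 then "usuario2"
      else determinar_ganador_loop usuario1 usuario2 rest

def determinar_ganador (usuario1 : Int) (usuario2 : Int) : String :=
  if usuario1 = usuario2 then "empate"
  else determinar_ganador_loop usuario1 usuario2 reglas

-- ===== PORT B =====
-- cycle position of move k (1=Piedra,2=Papel,3=Tijera,4=Lagarto,5=Spock)
def CYCLE : List Int := [0, 2, 4, 3, 1]

def determinar_ganador_alt (usuario1 : Int) (usuario2 : Int) : String :=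
  if usuario1 = usuario2 ∨ ¬ (1 ≤ usuario1 ∧ usuario1 ≤ 5) ∨ ¬ (1 ≤ usuario2 ∧ usuario2 ≤ 5) then
    "empate"
  else
    -- the indices usuario1-1, usuario2-1 are in range here, so pyGet? is some; getD 0 never fires
    let d := PySem.Int.mod
      ((PySem.List.pyGet? CYCLE (usuario1 - 1)).getD 0
        - (PySem.List.pyGet? CYCLE (usuario2 - 1)).getD 0) 5
    if d = 1 ∨ d = 2 then "usuario1" else "usuario2"

-- ===== PRECONDITION & SPEC =====
def Spec_determinar_ganador (usuario1 : Int) (usuario2 : Int) (out : String) : Prop := out = determinar_ganador_alt usuario1 usuario2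
instance (usuario1 : Int) (usuario2 : Int) (out : String) : Decidable (Spec_determinar_ganador usuario1 usuario2 out) := by unfold Spec_determinar_ganador; infer_instance

-- ===== CLAIM (what is proved, stated in full; the proofs are below) =====
def Claim_equal_determinar_ganador : Prop := ∀ (usuario1 : Int) (usuario2 : Int), Dom_determinar_ganador usuario1 usuario2 → Spec_determinar_ganador usuario1 usuario2 (determinar_ganador usuario1 usuario2)

-- ===== LEMMAS AND PROOFS =====
-- A falls through its loop to "empate" whenever either move is outside 1..5
theorem determinar_ganador_out (u1 u2 : Int)
    (h : ¬ (1 ≤ u1 ∧ u1 ≤ 5) ∨ ¬ (1 ≤ u2 ∧ u2 ≤ 5)) :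
    determinar_ganador u1 u2 = "empate" := by
  unfold determinar_ganador
  split_ifs with hq
  · rfl
  · simp only [reglas, determinar_ganador_loop, List.mem_cons, List.not_mem_nil,
      true_and, or_false, false_or]
    split_ifs <;> first | rfl | omega

theorem determinar_ganador_eq_alt (usuario1 usuario2 : Int) :
    determinar_ganador usuario1 usuario2 = determinar_ganador_alt usuario1 usuario2 := by
  by_cases hin : (1 ≤ usuario1 ∧ usuario1 ≤ 5) ∧ (1 ≤ usuario2 ∧ usuario2 ≤ 5)
  · obtain ⟨⟨l1, r1⟩, l2, r2⟩ := hin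
    interval_cases usuario1 <;> interval_cases usuario2 <;> decide
  · have h : ¬ (1 ≤ usuario1 ∧ usuario1 ≤ 5) ∨ ¬ (1 ≤ usuario2 ∧ usuario2 ≤ 5) := by tauto
    rw [determinar_ganador_out usuario1 usuario2 h]
    unfold determinar_ganador_alt
    rw [if_pos (Or.inr h)]

-- ===== VERDICT (by name: the statement is the Claim_ definition above) =====
theorem determinar_ganador_spec : Claim_equal_determinar_ganador := by
  intro u1 u2 _
  exact determinar_ganador_eq_alt u1 u2
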